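-- pv_equiv track=rewrite | github.com/pypi-data/pypi-mirror-250 | packages/caluxPy-fi/caluxpy_fi-0.1.4.tar.gz/caluxpy_fi-0.1.4/src/caluxPy_fi/Calculador.py | diasAlVencimiento
-- ===== SOURCE A (Python) =====
-- def diasAlVencimiento(nper, dias_cupon): #Cálculo de los días al vencimiento de cada cupón
--     dias_al_vencimiento = []
--     i = 0
--     while i <= nper:
--         if i == 0:
--             dias_al_vencimiento.append(dias_cupon[0])
--         else:
--             dias_al_vencimiento.append(dias_al_vencimiento[i - 1] + dias_cupon[i])
--         i += 1
--     return dias_al_vencimiento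
-- ===== SOURCE B (Python) =====
-- def _scan(xs):
--     # divide-and-conquer prefix sums: scan each half, then shift the right half
--     if len(xs) <= 1:
--         return list(xs)
--     mid = len(xs) // 2
--     left = _scan(xs[:mid])
--     right = _scan(xs[mid:])
--     base = left[-1]
--     return left + [base + r for r in right]
--
-- def diasAlVencimiento(nper, dias_cupon):
--     vals = [dias_cupon[i] for i in range(nper + 1)]
--     return _scan(vals)
-- ===== Notes on version B (the rewrite author's own statement) =====
-- stated objective: alternative
-- what changed: B replaces A's stateful while loop (which reads the previously appended output element back from the list) by a divide-and-conquer scan: gather the first nper+1 coupon-day entries, recursively prefix-sum each half, and shift the right half by the left half's total.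
import Mathlib
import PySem

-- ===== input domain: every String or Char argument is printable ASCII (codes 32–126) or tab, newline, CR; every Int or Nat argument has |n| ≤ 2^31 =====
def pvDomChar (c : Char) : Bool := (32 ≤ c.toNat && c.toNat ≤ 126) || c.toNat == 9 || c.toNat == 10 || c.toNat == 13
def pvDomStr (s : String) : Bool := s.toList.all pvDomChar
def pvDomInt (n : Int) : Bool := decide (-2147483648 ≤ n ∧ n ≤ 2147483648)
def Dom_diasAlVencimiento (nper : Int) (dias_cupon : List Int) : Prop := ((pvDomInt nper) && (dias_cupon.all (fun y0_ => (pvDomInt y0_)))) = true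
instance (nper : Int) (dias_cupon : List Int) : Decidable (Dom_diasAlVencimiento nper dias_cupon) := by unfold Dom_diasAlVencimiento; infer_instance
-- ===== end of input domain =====

-- B replaces A's stateful self-indexing while loop by a divide-and-conquer scan
-- (recurse on halves, shift the right half by the left total); objective: alternative.

-- ===== PORT A =====
-- loop body of A's while loop (i = 0 .. nper), reading the previous output element back
def stepA (dias_cupon : List Int) (acc : List Int) (i : Int) : List Int :=
  if i = 0 then acc ++ [PySem.List.pyGetD dias_cupon 0 0]
  else acc ++ [PySem.List.pyGetD acc (i - 1) 0 + PySem.List.pyGetD dias_cupon i 0]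

def diasAlVencimiento (nper : Int) (dias_cupon : List Int) : List Int :=
  (PySem.List.pyRange 0 (nper + 1) 1).foldl (stepA dias_cupon) []

-- ===== PORT B =====
-- B's _scan: divide-and-conquer prefix sums (halve, recurse, shift right half by left[-1])
-- the final line of _scan: left + [left[-1] + r for r in right]
def scanGlue (left right : List Int) : List Int :=
  left ++ right.map (fun r => PySem.List.pyGetD left (-1) 0 + r)

def scanB (xs : List Int) : List Int :=
  if h : xs.length <= 1 then xs
  else
    scanGlue (scanB (xs.take (xs.length / 2))) (scanB (xs.drop (xs.length / 2)))
termination_by xs.length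
decreasing_by
  · simp only [List.length_take]; omega
  · simp only [List.length_drop]; omega

-- B: vals = [dias_cupon[i] for i in range(nper+1)]; return _scan(vals)
def diasAlVencimiento_alt (nper : Int) (dias_cupon : List Int) : List Int :=
  scanB ((PySem.List.pyRange 0 (nper + 1) 1).map
    (fun i => PySem.List.pyGetD dias_cupon i 0))

-- ===== PRECONDITION & SPEC =====
-- Pre_ excludes exactly the inputs on which Python A raises IndexError (nper ≥ len(dias_cupon)).
def Pre_diasAlVencimiento (nper : Int) (dias_cupon : List Int) : Prop :=
  nper < (dias_cupon.length : Int)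
instance (nper : Int) (dias_cupon : List Int) : Decidable (Pre_diasAlVencimiento nper dias_cupon) := by
  unfold Pre_diasAlVencimiento; infer_instance

def pvWitness_diasAlVencimiento : Int × List Int := (2, [10, 20, 30])

def Spec_diasAlVencimiento (nper : Int) (dias_cupon : List Int) (out : List Int) : Prop := out = diasAlVencimiento_alt nper dias_cupon
instance (nper : Int) (dias_cupon : List Int) (out : List Int) : Decidable (Spec_diasAlVencimiento nper dias_cupon out) := by unfold Spec_diasAlVencimiento; infer_instance

-- ===== CLAIM (what is proved, stated in full; the proofs are below) =====
def Claim_equal_diasAlVencimiento : Prop := ∀ (nper : Int) (dias_cupon : List Int), Dom_diasAlVencimiento nper dias_cupon → Pre_diasAlVencimiento nper dias_cupon → Spec_diasAlVencimiento nper dias_cupon (diasAlVencimiento nper dias_cupon)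

-- ===== LEMMAS AND PROOFS =====

-- prefix sum of the first j entries, reading dias_cupon[0..j-1]
def pvS (dias_cupon : List Int) (j : Nat) : Int :=
  ((List.range j).map (fun t : Nat => PySem.List.pyGetD dias_cupon (t : Int) 0)).sum

theorem pvS_succ (dc : List Int) (j : Nat) :
    pvS dc (j + 1) = pvS dc j + PySem.List.pyGetD dc (j : Int) 0 := by
  simp [pvS, List.range_succ]

theorem foldA_char (dc : List Int) (m : Nat) :
    (PySem.List.pyRange 0 (m : Int) 1).foldl (stepA dc) [] =
      (List.range m).map (fun k => pvS dc (k + 1)) := by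
  induction m with
  | zero => simp
  | succ m ih =>
    have hsplit : PySem.List.pyRange 0 ((m + 1 : Nat) : Int) 1 =
        PySem.List.pyRange 0 (m : Int) 1 ++ [(m : Int)] := by
      have : ((m + 1 : Nat) : Int) = (m : Int) + 1 := by push_cast; ring
      rw [this, PySem.List.pyRange_one_succ_right (by positivity)]
    rw [hsplit, List.foldl_append, ih, List.range_succ, List.map_append]
    simp only [List.foldl_cons, List.foldl_nil, List.map_cons, List.map_nil]
    rcases Nat.eq_zero_or_pos m with hm | hm
    · subst hm
      simp [stepA, pvS, List.range_succ, PySem.List.pyGetD_zero, List.getD]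
    · have hne : ((m : Int)) ≠ 0 := by exact_mod_cast Nat.pos_iff_ne_zero.mp hm
      have hlen : ((List.range m).map (fun k => pvS dc (k + 1))).length = m := by simp
      have hget : PySem.List.pyGetD ((List.range m).map (fun k => pvS dc (k + 1))) ((m : Int) - 1) 0
          = pvS dc m := by
        have hc : ((m : Int) - 1) = ((m - 1 : Nat) : Int) := by omega
        rw [hc, PySem.List.pyGetD_natCast]
        rw [List.getD_eq_getElem _ _ (by rw [hlen]; omega)]
        rw [List.getElem_map, List.getElem_range]
        congr 1
        omega
      simp only [stepA]
      rw [if_neg hne, hget, pvS_succ]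

-- the intended result of a scan: entry k is the sum of the first k+1 elements
def pvF (xs : List Int) : List Int :=
  (List.range xs.length).map (fun k => (xs.take (k + 1)).sum)

theorem pvF_append (ys zs : List Int) :
    pvF (ys ++ zs) = pvF ys ++ (pvF zs).map (fun r => ys.sum + r) := by
  unfold pvF
  rw [List.length_append, List.range_add, List.map_append, List.map_map, List.map_map]
  congr 1
  · apply List.map_congr_left
    intro k hk
    rw [List.mem_range] at hk
    rw [List.take_append_of_le_length (by omega)]
  · apply List.map_congr_left
    intro k hk
    simp only [Function.comp_apply]
    have h1 : ys.length + k + 1 = ys.length + (k + 1) := by omega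
    rw [h1, List.take_append, List.sum_append,
        List.take_of_length_le (by omega : ys.length ≤ ys.length + (k + 1))]
    have h2 : ys.length + (k + 1) - ys.length = k + 1 := by omega
    rw [h2]

theorem pvF_last (ys : List Int) (h : ys ≠ []) :
    PySem.List.pyGetD (pvF ys) (-1) 0 = ys.sum := by
  have hlen : (pvF ys).length = ys.length := by simp [pvF]
  have hne : pvF ys ≠ [] := by
    intro hc
    apply h
    have := congrArg List.length hc
    rw [hlen] at this
    exact List.length_eq_zero_iff.mp this
  rw [PySem.List.pyGetD_neg_one _ _ hne, List.getLast_eq_getElem]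
  have hy : 0 < ys.length := List.length_pos_iff.mpr h
  simp only [pvF, List.length_map, List.length_range, List.getElem_map, List.getElem_range]
  rw [show ys.length - 1 + 1 = ys.length from by omega, List.take_of_length_le (le_refl _)]

theorem scanB_char (xs : List Int) : scanB xs = pvF xs := by
  induction hn : xs.length using Nat.strong_induction_on generalizing xs with
  | _ n ih =>
  subst hn
  rw [scanB]
  by_cases h : xs.length <= 1
  · rw [dif_pos h]
    match xs, h with
    | [], _ => simp [pvF]
    | [a], _ => simp [pvF]
  · rw [dif_neg h]
    push_neg at h
    have hmid1 : 1 <= xs.length / 2 := by omega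
    have hmid2 : xs.length / 2 < xs.length := by omega
    have hL : (xs.take (xs.length / 2)).length = xs.length / 2 := by
      simp [List.length_take]; omega
    have hR : (xs.drop (xs.length / 2)).length = xs.length - xs.length / 2 := by
      simp [List.length_drop]
    rw [ih _ (by omega) _ hL, ih _ (by omega) _ hR]
    have hne : xs.take (xs.length / 2) ≠ [] := by
      intro hc
      have := congrArg List.length hc
      rw [hL] at this
      simp at this
      omega
    unfold scanGlue
    rw [pvF_last _ hne]
    conv_rhs => rw [← List.take_append_drop (xs.length / 2) xs, pvF_append]

-- B's port equals the same prefix-sum table as A's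
theorem foldB_char (dc : List Int) (m : Nat) :
    scanB ((PySem.List.pyRange 0 (m : Int) 1).map
        (fun i => PySem.List.pyGetD dc i 0)) =
      (List.range m).map (fun k => pvS dc (k + 1)) := by
  rw [PySem.List.pyRange_zero_natCast, List.map_map, scanB_char]
  unfold pvF
  rw [List.length_map, List.length_range]
  apply List.map_congr_left
  intro k hk
  rw [List.mem_range] at hk
  rw [← List.map_take, List.take_range]
  have : min (k + 1) m = k + 1 := by omega
  rw [this]
  rfl

-- ===== VERDICT (by name: the statement is the Claim_ definition above) =====
theorem diasAlVencimiento_spec : Claim_equal_diasAlVencimiento := by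
  intro nper dc _ _
  unfold Spec_diasAlVencimiento diasAlVencimiento diasAlVencimiento_alt
  by_cases h : nper + 1 <= 0
  · rw [PySem.List.pyRange_one_eq_nil h]
    simp [scanB]
  · have hm : nper + 1 = ((nper.toNat + 1 : Nat) : Int) := by omega
    rw [hm, foldA_char, foldB_char]
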